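-- pv_equiv track=rewrite | github.com/UnitedCTF/UnitedCTF-2025 | challenges/programming/password-generator/server/main.py | has_ala_pattern
-- ===== SOURCE A (Python) =====
-- def has_ala_pattern(x):
--   a_variants = 'aA@'
--   l_variants = 'lL1!'
--
--   for i in range(len(x) - 2):
--     if (x[i] in a_variants and
--       x[i+1] in l_variants and
--       x[i+2] in a_variants):
--       return True
--   return False
-- ===== SOURCE B (Python) =====
-- def has_ala_pattern(x):
--   normalized = ''.join(
--     'a' if c in 'aA@' else 'l' if c in 'lL1!' else '.'
--     for c in x)
--   return 'ala' in normalized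
-- ===== Notes on version B (the rewrite author's own statement) =====
-- stated objective: simpler
-- what changed: Replaces the manual index-wise triple-window scan by canonicalizing each character ('aA@'->'a', 'lL1!'->'l', else '.') in one pass and then doing a single substring search for the canonical pattern.
import Mathlib
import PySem

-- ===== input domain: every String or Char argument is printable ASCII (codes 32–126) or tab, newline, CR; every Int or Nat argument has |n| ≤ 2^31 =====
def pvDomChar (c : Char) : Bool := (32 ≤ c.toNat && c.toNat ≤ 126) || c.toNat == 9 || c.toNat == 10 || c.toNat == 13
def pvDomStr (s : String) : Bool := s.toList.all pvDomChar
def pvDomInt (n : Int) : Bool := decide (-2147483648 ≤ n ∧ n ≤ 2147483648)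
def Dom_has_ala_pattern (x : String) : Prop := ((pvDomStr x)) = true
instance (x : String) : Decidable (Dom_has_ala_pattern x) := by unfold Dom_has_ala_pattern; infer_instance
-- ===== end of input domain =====

-- B canonicalizes each character once ('aA@'->'a', 'lL1!'->'l', else '.') and does one
-- substring search for the canonical pattern, instead of A's manual triple-window scan; simpler.


-- ===== PORT A =====
-- 'aA@' and 'lL1!' as the lists of their characters; 'x[i] in a_variants' with x[i] a
-- single character is a character-membership test.
def aVariants : List Char := ['a', 'A', '@']
def lVariants : List Char := ['l', 'L', '1', '!']

-- 'x[i] in vars' (pyGet? is exact Python indexing; all indices used are in range)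
def pvMemVar (vars : List Char) (oc : Option Char) : Bool :=
  match oc with
  | some c => vars.contains c
  | none => false

-- the for-loop with early 'return True' is an .any over the range
def has_ala_pattern (x : String) : Bool :=
  (PySem.List.pyRange 0 (PySem.Str.len x - 2) 1).any fun i =>
    pvMemVar aVariants (PySem.Str.pyGet? x i) &&
    pvMemVar lVariants (PySem.Str.pyGet? x (i + 1)) &&
    pvMemVar aVariants (PySem.Str.pyGet? x (i + 2))

-- ===== PORT B =====
-- per-character canonicalization used inside the join comprehension
def pvNorm (c : Char) : Char :=
  if aVariants.contains c then 'a'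
  else if lVariants.contains c then 'l'
  else '.'

-- ''.join of one-character pieces is the string of the mapped character list;
-- the Python 'in' substring test is PySem.Str.isIn.
def has_ala_pattern_alt (x : String) : Bool :=
  PySem.Str.isIn "ala" (String.ofList (x.toList.map pvNorm))

-- ===== PRECONDITION & SPEC =====
def Spec_has_ala_pattern (x : String) (out : Bool) : Prop := out = has_ala_pattern_alt x
instance (x : String) (out : Bool) : Decidable (Spec_has_ala_pattern x out) := by unfold Spec_has_ala_pattern; infer_instance

-- ===== CLAIM (what is proved, stated in full; the proofs are below) =====
def Claim_equal_has_ala_pattern : Prop := ∀ (x : String), Dom_has_ala_pattern x → Spec_has_ala_pattern x (has_ala_pattern x)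

-- ===== LEMMAS AND PROOFS =====

-- A's scan, phrased as structural recursion over the character list
def pvWinA : List Char → Bool
  | a :: b :: c :: rest =>
      (aVariants.contains a && lVariants.contains b && aVariants.contains c) ||
      pvWinA (b :: c :: rest)
  | _ => false

theorem pv_disjoint (c : Char) (h : aVariants.contains c = true) :
    lVariants.contains c = false := by
  simp [aVariants] at h
  rcases h with h | h | h <;> subst h <;> decide

theorem pvNorm_eq_a (c : Char) : (pvNorm c = 'a') ↔ aVariants.contains c = true := by
  unfold pvNorm
  split_ifs with h1 h2 <;> simp_all

theorem pvNorm_eq_l (c : Char) : (pvNorm c = 'l') ↔ lVariants.contains c = true := by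
  unfold pvNorm
  split_ifs with h1 h2 <;> simp_all
  have := pv_disjoint c (by simp [h1])
  simp_all

theorem pv_range_eq_winA (l : List Char) :
    ((List.range (l.length - 2)).any fun k =>
        pvMemVar aVariants l[k]? &&
        pvMemVar lVariants l[k + 1]? &&
        pvMemVar aVariants l[k + 2]?) = pvWinA l := by
  induction l with
  | nil => simp [pvWinA]
  | cons a t ih =>
    match t with
    | [] => simp [pvWinA]
    | [b] => simp [pvWinA]
    | b :: c :: rest =>
      have hlen : (a :: b :: c :: rest).length - 2 = rest.length + 1 := by
        simp
      rw [hlen, List.range_succ_eq_map, List.any_cons, List.any_map]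
      have hfun2 : ((fun k => pvMemVar aVariants (a :: b :: c :: rest)[k]? &&
            pvMemVar lVariants (a :: b :: c :: rest)[k + 1]? &&
            pvMemVar aVariants (a :: b :: c :: rest)[k + 2]?) ∘ Nat.succ) =
          (fun k => pvMemVar aVariants (b :: c :: rest)[k]? &&
            pvMemVar lVariants (b :: c :: rest)[k + 1]? &&
            pvMemVar aVariants (b :: c :: rest)[k + 2]?) := by
        funext k
        simp [Function.comp]
      have htail := ih
      rw [show (b :: c :: rest).length - 2 = rest.length from by simp] at htail
      rw [hfun2, htail, pvWinA]
      simp [pvMemVar]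

theorem pv_winA_iff_infix (l : List Char) :
    pvWinA l = true ↔ ['a', 'l', 'a'] <:+: l.map pvNorm := by
  induction l with
  | nil =>
    simp only [pvWinA, Bool.false_eq_true, false_iff, List.map_nil]
    intro h
    have := h.length_le
    simp at this
  | cons a t ih =>
    match t with
    | [] =>
      simp only [pvWinA, Bool.false_eq_true, false_iff]
      intro h
      have := h.length_le
      simp at this
    | [b] =>
      simp only [pvWinA, Bool.false_eq_true, false_iff]
      intro h
      have := h.length_le
      simp at this
    | b :: c :: rest =>
      rw [pvWinA]
      have ihtail := ih
      constructor
      · intro h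
        rcases Bool.or_eq_true_iff.mp h with h | h
        · simp only [Bool.and_eq_true] at h
          obtain ⟨⟨h1, h2⟩, h3⟩ := h
          refine ⟨[], (rest.map pvNorm), ?_⟩
          simp [(pvNorm_eq_a a).mpr h1, (pvNorm_eq_l b).mpr h2, (pvNorm_eq_a c).mpr h3]
        · rw [List.map_cons]
          exact List.infix_cons_iff.mpr (Or.inr (ihtail.mp h))
      · intro h
        rw [List.map_cons] at h
        rcases List.infix_cons_iff.mp h with h | h
        · rcases List.cons_prefix_cons.mp h with ⟨h1, h2⟩
          rw [List.map_cons] at h2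
          rcases List.cons_prefix_cons.mp h2 with ⟨h3, h4⟩
          rw [List.map_cons] at h4
          rcases List.cons_prefix_cons.mp h4 with ⟨h5, _⟩
          apply Bool.or_eq_true_iff.mpr
          left
          rw [Bool.and_eq_true_iff, Bool.and_eq_true_iff]
          exact ⟨⟨(pvNorm_eq_a a).mp h1.symm, (pvNorm_eq_l b).mp h3.symm⟩,
                 (pvNorm_eq_a c).mp h5.symm⟩
        · exact Bool.or_eq_true_iff.mpr (Or.inr (ihtail.mpr h))

-- ===== VERDICT (by name: the statement is the Claim_ definition above) =====
theorem has_ala_pattern_spec : Claim_equal_has_ala_pattern := by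
  intro x _
  unfold Spec_has_ala_pattern has_ala_pattern has_ala_pattern_alt
  have hlen : PySem.Str.len x = (x.toList.length : Int) := by simp
  have hrange : PySem.List.pyRange 0 ((x.toList.length : Int) - 2) 1 =
      (List.range (x.toList.length - 2)).map (fun k : Nat => (k : Int)) := by
    by_cases h2 : 2 ≤ x.toList.length
    · rw [show ((x.toList.length : Int) - 2) = ((x.toList.length - 2 : Nat) : Int) by omega]
      exact PySem.List.pyRange_zero_natCast _
    · rw [PySem.List.pyRange_one_eq_nil (by omega),
          show x.toList.length - 2 = 0 by omega]
      simp
  rw [hlen, hrange, List.any_map]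
  have hfun : ((fun i => pvMemVar aVariants (PySem.Str.pyGet? x i) &&
        pvMemVar lVariants (PySem.Str.pyGet? x (i + 1)) &&
        pvMemVar aVariants (PySem.Str.pyGet? x (i + 2))) ∘ (fun k : Nat => (k : Int))) =
      (fun k : Nat =>
        pvMemVar aVariants x.toList[k]? &&
        pvMemVar lVariants x.toList[k + 1]? &&
        pvMemVar aVariants x.toList[k + 2]?) := by
    funext k
    simp only [Function.comp_apply]
    rw [show ((k : Int) + 1) = ((k + 1 : Nat) : Int) by push_cast; ring,
        show ((k : Int) + 2) = ((k + 2 : Nat) : Int) by push_cast; ring]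
    simp only [PySem.Str.pyGet?_natCast]
  rw [hfun, pv_range_eq_winA x.toList]
  rw [Bool.eq_iff_iff, pv_winA_iff_infix x.toList, PySem.Str.isIn_iff_infix]
  simp
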